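-- pv_equiv track=rewrite | github.com/silmonbiggs/extensible-longevity-model | scripts/build_paper1_deck.py | split_stage_objects
-- ===== SOURCE A (Python) =====
-- def split_stage_objects(array_body: str):
--     """Split the text between [ and ] into individual stage object strings.
--
--     Each top-level { ... } at brace-depth 0 is one stage.
--     """
--     stages = []
--     depth = 0
--     obj_start = None
--     i = 0
--     while i < len(array_body):
--         ch = array_body[i]
--         if ch == "{" and depth == 0:
--             obj_start = i
--             depth = 1
--         elif ch == "{":
--             depth += 1
--         elif ch == "}" and depth == 1:
--             depth = 0
--             stages.append(array_body[obj_start : i + 1])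
--             obj_start = None
--         elif ch == "}":
--             depth -= 1
--         # Skip string literals
--         elif ch in ("'", '"', '`') and depth > 0:
--             quote = ch
--             i += 1
--             while i < len(array_body) and array_body[i] != quote:
--                 if array_body[i] == "\\":
--                     i += 1
--                 i += 1
--         i += 1
--     return stages
-- ===== SOURCE B (Python) =====
-- def split_stage_objects(array_body: str):
--     """Split the text between [ and ] into individual stage object strings.
--
--     Single flat pass: a state machine with depth, in-string/quote and an
--     escape flag instead of an inner string-skipping loop.
--     """
--     stages = []
--     depth = 0
--     obj_start = 0
--     in_string = False
--     quote = ''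
--     escape = False
--     for i in range(len(array_body)):
--         ch = array_body[i]
--         if in_string:
--             if escape:
--                 escape = False
--             elif ch == '\\':
--                 escape = True
--             elif ch == quote:
--                 in_string = False
--         elif ch == '{':
--             if depth == 0:
--                 obj_start = i
--             depth += 1
--         elif ch == '}':
--             depth -= 1
--             if depth == 0:
--                 stages.append(array_body[obj_start : i + 1])
--         elif ch in ("'", '"', '`') and depth > 0:
--             in_string = True
--             quote = ch
--             escape = False
--     return stages
-- ===== Notes on version B (the rewrite author's own statement) =====
-- stated objective: simpler
-- what changed: Replaces A's nested index-jumping inner string-skip loop with a single flat pass over the characters that maintains in_string/quote/escape state alongside the brace depth.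
import Mathlib
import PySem

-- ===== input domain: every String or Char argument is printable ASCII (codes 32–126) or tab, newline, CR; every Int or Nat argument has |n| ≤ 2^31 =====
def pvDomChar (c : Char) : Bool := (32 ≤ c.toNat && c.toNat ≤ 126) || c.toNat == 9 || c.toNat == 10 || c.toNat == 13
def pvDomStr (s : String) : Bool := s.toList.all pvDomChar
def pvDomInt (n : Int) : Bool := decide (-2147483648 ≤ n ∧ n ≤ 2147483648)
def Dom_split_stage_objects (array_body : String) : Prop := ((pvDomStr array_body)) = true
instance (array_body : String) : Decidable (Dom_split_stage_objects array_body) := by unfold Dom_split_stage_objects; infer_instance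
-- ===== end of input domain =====

-- B replaces A's nested index-jumping string-skip loop by a single flat pass that
-- keeps in_string/quote/escape state; objective: simpler (same O(n) cost).

-- ===== PORT A =====

-- A's inner string-skipping loop: while i < len and s[i] != quote: (if s[i]=='\\': i+=1); i+=1
-- returns the final value of i.
def pvSkipStr (cs : List Char) (quote : Char) (i : Nat) : Nat :=
  if h : i < cs.length then
    if cs[i] = quote then i
    else if cs[i] = '\\' then pvSkipStr cs quote (i + 2)
    else pvSkipStr cs quote (i + 1)
  else i
termination_by cs.length - i

theorem pvSkipStr_ge (cs : List Char) (quote : Char) (i : Nat) : i ≤ pvSkipStr cs quote i := by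
  fun_induction pvSkipStr cs quote i <;> omega

-- A's outer while loop over index i with state (stages, depth, obj_start).
def pvLoopA (cs : List Char) (stages : List String) (depth : Int)
    (obj_start : Option Nat) (i : Nat) : List String :=
  if h : i < cs.length then
    let ch := cs[i]
    if ch = '{' ∧ depth = 0 then
      pvLoopA cs stages 1 (some i) (i + 1)
    else if ch = '{' then
      pvLoopA cs stages (depth + 1) obj_start (i + 1)
    else if ch = '}' ∧ depth = 1 then
      -- array_body[obj_start : i+1], obj_start always set here (getD 0 unreachable)
      let s := obj_start.getD 0
      pvLoopA cs (stages ++ [String.ofList ((cs.drop s).take (i + 1 - s))]) 0 none (i + 1)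
    else if ch = '}' then
      pvLoopA cs stages (depth - 1) obj_start (i + 1)
    else if (ch = '\'' ∨ ch = '"' ∨ ch = '`') ∧ 0 < depth then
      pvLoopA cs stages depth obj_start (pvSkipStr cs ch (i + 1) + 1)
    else
      pvLoopA cs stages depth obj_start (i + 1)
  else stages
termination_by cs.length - i
decreasing_by
  · omega
  · omega
  · omega
  · omega
  · have := pvSkipStr_ge cs cs[i] (i + 1); omega
  · omega

def split_stage_objects (array_body : String) : List String :=
  pvLoopA array_body.toList [] 0 none 0

-- ===== PORT B =====

-- B's single flat for-loop over i with state (stages, depth, obj_start, in_string, quote, escape).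
def pvLoopB (cs : List Char) (i : Nat) (stages : List String) (depth : Int)
    (obj_start : Nat) (in_string : Bool) (quote : Char) (escape : Bool) : List String :=
  if h : i < cs.length then
    let ch := cs[i]
    if in_string then
      if escape then
        pvLoopB cs (i + 1) stages depth obj_start true quote false
      else if ch = '\\' then
        pvLoopB cs (i + 1) stages depth obj_start true quote true
      else if ch = quote then
        pvLoopB cs (i + 1) stages depth obj_start false quote false
      else
        pvLoopB cs (i + 1) stages depth obj_start true quote false
    else if ch = '{' then
      pvLoopB cs (i + 1) stages (depth + 1) (if depth = 0 then i else obj_start) false quote escape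
    else if ch = '}' then
      pvLoopB cs (i + 1)
        (if depth - 1 = 0 then stages ++ [String.ofList ((cs.drop obj_start).take (i + 1 - obj_start))]
         else stages)
        (depth - 1) obj_start false quote escape
    else if (ch = '\'' ∨ ch = '"' ∨ ch = '`') ∧ 0 < depth then
      pvLoopB cs (i + 1) stages depth obj_start true ch false
    else
      pvLoopB cs (i + 1) stages depth obj_start false quote escape
  else stages
termination_by cs.length - i

def split_stage_objects_alt (array_body : String) : List String :=
  pvLoopB array_body.toList 0 [] 0 0 false ' ' false

-- ===== PRECONDITION & SPEC =====
def Spec_split_stage_objects (array_body : String) (out : List String) : Prop := out = split_stage_objects_alt array_body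
instance (array_body : String) (out : List String) : Decidable (Spec_split_stage_objects array_body out) := by unfold Spec_split_stage_objects; infer_instance

-- ===== CLAIM (what is proved, stated in full; the proofs are below) =====
def Claim_equal_split_stage_objects : Prop := ∀ (array_body : String), Dom_split_stage_objects array_body → Spec_split_stage_objects array_body (split_stage_objects array_body)

-- ===== LEMMAS AND PROOFS =====

theorem pvSkipStr_end (cs : List Char) (q : Char) (i : Nat) (h : ¬ i < cs.length) :
    pvSkipStr cs q i = i := by
  rw [pvSkipStr]; exact dif_neg h

theorem pvLoopA_end (cs : List Char) (st : List String) (d : Int) (o : Option Nat) (i : Nat)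
    (h : ¬ i < cs.length) : pvLoopA cs st d o i = st := by
  rw [pvLoopA]; exact dif_neg h

theorem pvLoopB_end (cs : List Char) (i : Nat) (st : List String) (d : Int) (ob : Nat)
    (ins : Bool) (q : Char) (e : Bool) (h : ¬ i < cs.length) :
    pvLoopB cs i st d ob ins q e = st := by
  rw [pvLoopB]; exact dif_neg h

-- B, run in string mode with the escape flag clear, consumes exactly the characters A's
-- inner skip loop consumes and resumes plain mode one past the closing quote.
theorem pvLoopB_string (cs : List Char) (q : Char) (hq : q ≠ '\\') :
    ∀ n i stages depth ob, cs.length - i ≤ n →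
      pvLoopB cs i stages depth ob true q false
        = pvLoopB cs (pvSkipStr cs q i + 1) stages depth ob false q false := by
  intro n
  induction n with
  | zero =>
    intro i stages depth ob hn
    rw [pvSkipStr_end cs q i (by omega)]
    rw [pvLoopB_end cs i stages depth ob true q false (by omega)]
    rw [pvLoopB_end cs (i + 1) stages depth ob false q false (by omega)]
  | succ n ih =>
    intro i stages depth ob hn
    by_cases h : i < cs.length
    · by_cases hq' : cs[i] = q
      · have hskip : pvSkipStr cs q i = i := by
          rw [pvSkipStr]; rw [dif_pos h, if_pos hq']
        rw [hskip]
        rw [pvLoopB]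
        simp only [dif_pos h]
        rw [if_pos (by trivial)]
        rw [if_neg (by simp : ¬ (false = true))]
        rw [if_neg (show ¬ cs[i] = '\\' by rw [hq']; exact hq)]
        rw [if_pos hq']
      · by_cases hb : cs[i] = '\\'
        · have hskip : pvSkipStr cs q i = pvSkipStr cs q (i + 2) := by
            rw [pvSkipStr]; rw [dif_pos h, if_neg hq', if_pos hb]
          rw [hskip]
          rw [pvLoopB]
          simp only [dif_pos h]
          rw [if_pos (by trivial)]
          rw [if_neg (by simp : ¬ (false = true))]
          rw [if_pos hb]
          by_cases h2 : i + 1 < cs.length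
          · rw [pvLoopB]
            simp only [dif_pos h2]
            rw [if_pos (by trivial), if_pos (by trivial)]
            exact ih (i + 2) stages depth ob (by omega)
          · rw [pvLoopB_end cs (i + 1) stages depth ob true q true h2]
            rw [pvSkipStr_end cs q (i + 2) (by omega)]
            rw [pvLoopB_end cs (i + 2 + 1) stages depth ob false q false (by omega)]
        · have hskip : pvSkipStr cs q i = pvSkipStr cs q (i + 1) := by
            rw [pvSkipStr]; rw [dif_pos h, if_neg hq', if_neg hb]
          rw [hskip]
          rw [pvLoopB]
          simp only [dif_pos h]
          rw [if_pos (by trivial)]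
          rw [if_neg (by simp : ¬ (false = true))]
          rw [if_neg hb, if_neg hq']
          exact ih (i + 1) stages depth ob (by omega)
    · rw [pvSkipStr_end cs q i h]
      rw [pvLoopB_end cs i stages depth ob true q false h]
      rw [pvLoopB_end cs (i + 1) stages depth ob false q false (by omega)]

-- Main simulation: A's loop equals B's loop in plain mode, for any quote/escape leftovers,
-- provided obj_start agrees whenever the depth is positive.
theorem pvLoopA_eq_pvLoopB (cs : List Char) :
    ∀ n i stages depth oa ob q e, cs.length - i ≤ n → (1 ≤ depth → oa = some ob) →
      pvLoopA cs stages depth oa i = pvLoopB cs i stages depth ob false q e := by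
  intro n
  induction n with
  | zero =>
    intro i stages depth oa ob q e hn _
    rw [pvLoopA_end cs stages depth oa i (by omega)]
    rw [pvLoopB_end cs i stages depth ob false q e (by omega)]
  | succ n ih =>
    intro i stages depth oa ob q e hn hinv
    by_cases h : i < cs.length
    · rw [pvLoopA, pvLoopB]
      simp only [dif_pos h]
      rw [if_neg (by simp : ¬ (false = true))]
      by_cases hbr : cs[i] = '{'
      · by_cases hd : depth = 0
        · rw [if_pos (⟨hbr, hd⟩ : cs[i] = '{' ∧ depth = 0)]
          rw [if_pos hbr]
          subst hd
          rw [if_pos rfl]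
          rw [show (0 : Int) + 1 = 1 by norm_num]
          exact ih (i + 1) stages 1 (some i) i q e (by omega) (fun _ => rfl)
        · rw [if_neg (fun hc => hd hc.2)]
          rw [if_pos hbr]
          rw [if_pos hbr]
          rw [if_neg hd]
          exact ih (i + 1) stages (depth + 1) oa ob q e (by omega)
            (fun h1 => hinv (by omega))
      · have hne : cs[i] ≠ '{' := hbr
        by_cases hcl : cs[i] = '}'
        · by_cases hd : depth = 1
          · rw [if_neg (fun hc => hne hc.1), if_neg hne]
            rw [if_pos (⟨hcl, hd⟩ : cs[i] = '}' ∧ depth = 1)]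
            rw [if_neg hne, if_pos hcl]
            have hoa := hinv (by omega)
            rw [hoa]
            simp only [Option.getD_some]
            subst hd
            rw [if_pos (by norm_num : (1 : Int) - 1 = 0)]
            rw [show (1 : Int) - 1 = 0 by norm_num]
            exact ih (i + 1) _ 0 none ob q e (by omega) (fun hc => absurd hc (by norm_num))
          · rw [if_neg (fun hc => hne hc.1), if_neg hne]
            rw [if_neg (fun hc => hd hc.2), if_pos hcl]
            rw [if_neg hne, if_pos hcl]
            rw [if_neg (show ¬ depth - 1 = 0 by omega)]
            exact ih (i + 1) stages (depth - 1) oa ob q e (by omega)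
              (fun h1 => hinv (by omega))
        · rw [if_neg (fun hc => hne hc.1), if_neg hne]
          rw [if_neg (fun hc => hcl hc.1), if_neg hcl]
          rw [if_neg hne, if_neg hcl]
          by_cases hqd : (cs[i] = '\'' ∨ cs[i] = '"' ∨ cs[i] = '`') ∧ 0 < depth
          · rw [if_pos hqd, if_pos hqd]
            have hq : cs[i] ≠ '\\' := by
              rcases hqd.1 with h1 | h1 | h1 <;> rw [h1] <;> decide
            rw [pvLoopB_string cs cs[i] hq cs.length (i + 1) stages depth ob (by omega)]
            exact ih (pvSkipStr cs cs[i] (i + 1) + 1) stages depth oa ob cs[i] false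
              (by have := pvSkipStr_ge cs cs[i] (i + 1); omega) hinv
          · rw [if_neg hqd, if_neg hqd]
            exact ih (i + 1) stages depth oa ob q e (by omega) hinv
    · rw [pvLoopA_end cs stages depth oa i h]
      rw [pvLoopB_end cs i stages depth ob false q e h]

-- ===== VERDICT (by name: the statement is the Claim_ definition above) =====
theorem split_stage_objects_spec : Claim_equal_split_stage_objects := by
  intro array_body _
  unfold Spec_split_stage_objects split_stage_objects split_stage_objects_alt
  exact (pvLoopA_eq_pvLoopB array_body.toList array_body.toList.length 0 [] 0 none 0 ' ' false
    (by omega) (fun h => absurd h (by norm_num))).symm |>.symm
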